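-- pv_equiv track=rewrite | github.com/WJwonjun/KUCI | cose_102/convert_jamo.py | engkey2jamo
-- ===== SOURCE A (Python) =====
-- _ENGKEY2JAMO_={
--  'r': 'ㄱ',
--  'R': 'ㄲ',
--  's': 'ㄴ',
--  'e': 'ㄷ',
--  'E': 'ㄸ',
--  'f': 'ㄹ',
--  'a': 'ㅁ',
--  'q': 'ㅂ',
--  'Q': 'ㅃ',
--  't': 'ㅅ',
--  'T': 'ㅆ',
--  'd': 'ㅇ',
--  'w': 'ㅈ',
--  'W': 'ㅉ',
--  'c': 'ㅊ',
--  'z': 'ㅋ',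
--  'x': 'ㅌ',
--  'v': 'ㅍ',
--  'g': 'ㅎ',
--  'k': 'ㅏ',
--  'o': 'ㅐ',
--  'i': 'ㅑ',
--  'O': 'ㅒ',
--  'j': 'ㅓ',
--  'p': 'ㅔ',
--  'u': 'ㅕ',
--  'P': 'ㅖ',
--  'h': 'ㅗ',
--  'hk': 'ㅘ',
--  'ho': 'ㅙ',
--  'hl': 'ㅚ',
--  'y': 'ㅛ',
--  'n': 'ㅜ',
--  'nj': 'ㅝ',
--  'np': 'ㅞ',
--  'nl': 'ㅟ',
--  'b': 'ㅠ',
--  'm': 'ㅡ',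
--  'ml': 'ㅢ',
--  'l': 'ㅣ',
--  'rt': 'ㄳ',
--  'sw': 'ㄵ',
--  'sg': 'ㄶ',
--  'fr': 'ㄺ',
--  'fa': 'ㄻ',
--  'fq': 'ㄼ',
--  'ft': 'ㄽ',
--  'fx': 'ㄾ',
--  'fv': 'ㄿ',
--  'fg': 'ㅀ',
--  'qt': 'ㅄ'
-- }
--
-- def engkey2jamo(str):
--     ans=''
--     for word in str:
--         if word in _ENGKEY2JAMO_:
--             ans=ans+_ENGKEY2JAMO_[word]
--         else:
--             ans=ans+word
--     return ans
-- ===== SOURCE B (Python) =====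
-- _ENGKEY2JAMO_={
--  'r': 'ㄱ', 'R': 'ㄲ', 's': 'ㄴ', 'e': 'ㄷ', 'E': 'ㄸ', 'f': 'ㄹ', 'a': 'ㅁ',
--  'q': 'ㅂ', 'Q': 'ㅃ', 't': 'ㅅ', 'T': 'ㅆ', 'd': 'ㅇ', 'w': 'ㅈ', 'W': 'ㅉ',
--  'c': 'ㅊ', 'z': 'ㅋ', 'x': 'ㅌ', 'v': 'ㅍ', 'g': 'ㅎ', 'k': 'ㅏ', 'o': 'ㅐ',
--  'i': 'ㅑ', 'O': 'ㅒ', 'j': 'ㅓ', 'p': 'ㅔ', 'u': 'ㅕ', 'P': 'ㅖ', 'h': 'ㅗ',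
--  'hk': 'ㅘ', 'ho': 'ㅙ', 'hl': 'ㅚ', 'y': 'ㅛ', 'n': 'ㅜ', 'nj': 'ㅝ',
--  'np': 'ㅞ', 'nl': 'ㅟ', 'b': 'ㅠ', 'm': 'ㅡ', 'ml': 'ㅢ', 'l': 'ㅣ',
--  'rt': 'ㄳ', 'sw': 'ㄵ', 'sg': 'ㄶ', 'fr': 'ㄺ', 'fa': 'ㄻ', 'fq': 'ㄼ',
--  'ft': 'ㄽ', 'fx': 'ㄾ', 'fv': 'ㄿ', 'fg': 'ㅀ', 'qt': 'ㅄ'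
-- }
--
-- # Only single-character keys can ever match one iterated character of A's loop.
-- _PAIRS_ = [(k, v) for k, v in _ENGKEY2JAMO_.items() if len(k) == 1]
--
-- def engkey2jamo(str):
--     # Staged whole-string passes: one replace per key. Correct because the keys
--     # are distinct ASCII letters and every value is a non-ASCII jamo, so no
--     # pass can ever rewrite the output of an earlier pass.
--     for k, v in _PAIRS_:
--         str = str.replace(k, v)
--     return str
-- ===== Notes on version B (the rewrite author's own statement) =====
-- stated objective: faster
-- what changed: Replaces A's single character-by-character scan with dict membership and string concatenation by a staged algorithm: one whole-string replace pass per single-character key, correct because keys are distinct ASCII and values are non-ASCII jamo so passes cannot interfere.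
import Mathlib
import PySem

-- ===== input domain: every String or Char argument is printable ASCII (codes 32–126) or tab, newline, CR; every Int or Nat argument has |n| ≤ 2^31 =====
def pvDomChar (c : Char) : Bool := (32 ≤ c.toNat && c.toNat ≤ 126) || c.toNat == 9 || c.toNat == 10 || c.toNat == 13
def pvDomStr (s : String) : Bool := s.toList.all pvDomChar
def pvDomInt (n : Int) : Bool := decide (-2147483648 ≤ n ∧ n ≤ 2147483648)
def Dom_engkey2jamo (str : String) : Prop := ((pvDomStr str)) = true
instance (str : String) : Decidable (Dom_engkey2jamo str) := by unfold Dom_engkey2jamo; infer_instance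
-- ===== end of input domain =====

-- B replaces A's single per-character scan (dict membership + concatenation) by staged
-- whole-string replacement passes, one per single-character key (alternative algorithm).

-- ===== PORT A =====
def engkey2jamoDict : PySem.Dict String String := PySem.Dict.mk [
  ("r", "ㄱ"), ("R", "ㄲ"), ("s", "ㄴ"), ("e", "ㄷ"), ("E", "ㄸ"), ("f", "ㄹ"),
  ("a", "ㅁ"), ("q", "ㅂ"), ("Q", "ㅃ"), ("t", "ㅅ"), ("T", "ㅆ"), ("d", "ㅇ"),
  ("w", "ㅈ"), ("W", "ㅉ"), ("c", "ㅊ"), ("z", "ㅋ"), ("x", "ㅌ"), ("v", "ㅍ"),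
  ("g", "ㅎ"), ("k", "ㅏ"), ("o", "ㅐ"), ("i", "ㅑ"), ("O", "ㅒ"), ("j", "ㅓ"),
  ("p", "ㅔ"), ("u", "ㅕ"), ("P", "ㅖ"), ("h", "ㅗ"), ("hk", "ㅘ"), ("ho", "ㅙ"),
  ("hl", "ㅚ"), ("y", "ㅛ"), ("n", "ㅜ"), ("nj", "ㅝ"), ("np", "ㅞ"), ("nl", "ㅟ"),
  ("b", "ㅠ"), ("m", "ㅡ"), ("ml", "ㅢ"), ("l", "ㅣ"), ("rt", "ㄳ"), ("sw", "ㄵ"),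
  ("sg", "ㄶ"), ("fr", "ㄺ"), ("fa", "ㄻ"), ("fq", "ㄼ"), ("ft", "ㄽ"), ("fx", "ㄾ"),
  ("fv", "ㄿ"), ("fg", "ㅀ"), ("qt", "ㅄ")
]

def engkey2jamo (str : String) : String :=
  str.toList.foldl (fun ans word =>
    if (engkey2jamoDict.get? (String.ofList [word])).isSome then
      ans ++ (engkey2jamoDict.get? (String.ofList [word])).getD ""
    else
      ans ++ String.ofList [word]) ""

-- ===== PORT B =====
-- the single-character entries of the mapping, in dict order (as Char pairs)
def jamoPairs : List (Char × Char) := [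
  ('r', 'ㄱ'), ('R', 'ㄲ'), ('s', 'ㄴ'), ('e', 'ㄷ'), ('E', 'ㄸ'), ('f', 'ㄹ'),
  ('a', 'ㅁ'), ('q', 'ㅂ'), ('Q', 'ㅃ'), ('t', 'ㅅ'), ('T', 'ㅆ'), ('d', 'ㅇ'),
  ('w', 'ㅈ'), ('W', 'ㅉ'), ('c', 'ㅊ'), ('z', 'ㅋ'), ('x', 'ㅌ'), ('v', 'ㅍ'),
  ('g', 'ㅎ'), ('k', 'ㅏ'), ('o', 'ㅐ'), ('i', 'ㅑ'), ('O', 'ㅒ'), ('j', 'ㅓ'),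
  ('p', 'ㅔ'), ('u', 'ㅕ'), ('P', 'ㅖ'), ('h', 'ㅗ'), ('y', 'ㅛ'), ('n', 'ㅜ'),
  ('b', 'ㅠ'), ('m', 'ㅡ'), ('l', 'ㅣ')
]

-- one whole-string replace pass: str.replace(k, v) for a single-char key/value
def jamoPass (s : String) (kv : Char × Char) : String :=
  String.ofList (s.toList.map (fun c => if c = kv.1 then kv.2 else c))

def engkey2jamo_alt (str : String) : String :=
  jamoPairs.foldl jamoPass str

-- ===== PRECONDITION & SPEC =====
def Spec_engkey2jamo (str : String) (out : String) : Prop := out = engkey2jamo_alt str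
instance (str : String) (out : String) : Decidable (Spec_engkey2jamo str out) := by unfold Spec_engkey2jamo; infer_instance

-- ===== CLAIM (what is proved, stated in full; the proofs are below) =====
def Claim_equal_engkey2jamo : Prop := ∀ (str : String), Dom_engkey2jamo str → Spec_engkey2jamo str (engkey2jamo str)

-- ===== LEMMAS AND PROOFS =====

-- the per-character effect of B's staged passes, as a single function
def jamoStaged (ps : List (Char × Char)) (c : Char) : Char :=
  ps.foldl (fun c' kv => if c' = kv.1 then kv.2 else c') c

-- B's fold of whole-string passes = one map of the staged per-character function
theorem jamoPass_foldl (ps : List (Char × Char)) (l : List Char) :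
    ps.foldl jamoPass (String.ofList l) = String.ofList (l.map (jamoStaged ps)) := by
  induction ps generalizing l with
  | nil =>
    rw [List.foldl_nil, show (jamoStaged []) = fun c => c from rfl, List.map_id']
  | cons kv rest ih =>
    have hpass : jamoPass (String.ofList l) kv
        = String.ofList (l.map (fun c => if c = kv.1 then kv.2 else c)) := by
      simp [jamoPass]
    rw [List.foldl_cons, hpass, ih, List.map_map]
    rfl

-- A's per-character step agrees with B's staged per-character function on every
-- char below 128 (established once for all 128 codes by decide).
set_option maxRecDepth 4000 in
theorem engkey2jamo_step_fin : ∀ n : Fin 128,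
    (if (engkey2jamoDict.get? (String.ofList [Char.ofNat n.val])).isSome then
      (engkey2jamoDict.get? (String.ofList [Char.ofNat n.val])).getD ""
    else
      String.ofList [Char.ofNat n.val]) = String.ofList [jamoStaged jamoPairs (Char.ofNat n.val)] := by
  decide

theorem engkey2jamo_step (c : Char) (h : c.toNat < 128) :
    (if (engkey2jamoDict.get? (String.ofList [c])).isSome then
      (engkey2jamoDict.get? (String.ofList [c])).getD ""
    else
      String.ofList [c]) = String.ofList [jamoStaged jamoPairs c] := by
  have := engkey2jamo_step_fin ⟨c.toNat, h⟩
  simpa [Char.ofNat_toNat] using this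

theorem engkey2jamo_loop (l : List Char) (h : ∀ c ∈ l, c.toNat < 128) (acc : String) :
    l.foldl (fun ans word =>
      if (engkey2jamoDict.get? (String.ofList [word])).isSome then
        ans ++ (engkey2jamoDict.get? (String.ofList [word])).getD ""
      else
        ans ++ String.ofList [word]) acc = acc ++ String.ofList (l.map (jamoStaged jamoPairs)) := by
  induction l generalizing acc with
  | nil => simp
  | cons c rest ih =>
    have hc := engkey2jamo_step c (h c (by simp))
    have step : (if (engkey2jamoDict.get? (String.ofList [c])).isSome then
        acc ++ (engkey2jamoDict.get? (String.ofList [c])).getD ""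
      else
        acc ++ String.ofList [c]) = acc ++ String.ofList [jamoStaged jamoPairs c] := by
      split_ifs at hc ⊢ <;> rw [hc]
    have hrest : ∀ x ∈ rest, x.toNat < 128 := fun x hx => h x (List.mem_cons_of_mem _ hx)
    simp only [List.foldl_cons, step, ih hrest, List.map_cons]
    rw [String.append_assoc, ← String.ofList_append]
    rfl

-- ===== VERDICT (by name: the statement is the Claim_ definition above) =====
theorem engkey2jamo_spec : Claim_equal_engkey2jamo := by
  intro str hdom
  unfold Spec_engkey2jamo engkey2jamo engkey2jamo_alt
  have hB : jamoPairs.foldl jamoPass str = String.ofList (str.toList.map (jamoStaged jamoPairs)) := by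
    conv_lhs => rw [show str = String.ofList str.toList by simp]
    exact jamoPass_foldl jamoPairs str.toList
  rw [hB]
  apply engkey2jamo_loop str.toList ?_ ""
  intro c hc
  have := List.all_eq_true.mp hdom c hc
  simp [pvDomChar] at this
  omega
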